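-- pv_equiv track=rewrite | github.com/Sorush-vh/DSA | stringMatching.py | min_distinguishing_length
-- ===== SOURCE A (Python) =====
-- def min_distinguishing_length(type1, type2):
--     n = len(type1)
--     m = len(type1[0])
--
--     # Check for all lengths from 1 to m
--     for k in range(1, m + 1):
--         for i in range(m - k + 1):
--             type1_substrings = set()
--             type2_substrings = set()
--
--             for s in type1:
--                 type1_substrings.add(s[i:i + k])
--
--
--             for s in type2:
--                 type2_substrings.add(s[i:i + k])
--
--             if not type1_substrings & type2_substrings:
--                 return k
--
--     return m
-- ===== SOURCE B (Python) =====
-- def min_distinguishing_length(type1, type2):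
--     m = len(type1[0])
--
--     def distinguishes(k):
--         # True iff some window [i, i+k) separates type1 from type2
--         for i in range(m - k + 1):
--             t2 = {s[i:i + k] for s in type2}
--             if all(s[i:i + k] not in t2 for s in type1):
--                 return True
--         return False
--
--     if m == 0:
--         return 0
--     # 'distinguishes' is monotone in k, so binary search for the least k in [1, m]
--     # that works; if none works the search converges to m, which is also A's default.
--     lo, hi = 1, m
--     while lo < hi:
--         mid = (lo + hi) // 2
--         if distinguishes(mid):
--             hi = mid
--         else:
--             lo = mid + 1
--     return lo
-- ===== Notes on version B (the rewrite author's own statement) =====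
-- stated objective: faster
-- what changed: Replaces A's linear scan over candidate lengths k=1..m by a binary search on k, exploiting that 'some width-k window separates the two sets' is monotone in k; the per-window check builds only the type2 substring set and membership-tests type1 against it instead of materialising and intersecting two sets.
import Mathlib
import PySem

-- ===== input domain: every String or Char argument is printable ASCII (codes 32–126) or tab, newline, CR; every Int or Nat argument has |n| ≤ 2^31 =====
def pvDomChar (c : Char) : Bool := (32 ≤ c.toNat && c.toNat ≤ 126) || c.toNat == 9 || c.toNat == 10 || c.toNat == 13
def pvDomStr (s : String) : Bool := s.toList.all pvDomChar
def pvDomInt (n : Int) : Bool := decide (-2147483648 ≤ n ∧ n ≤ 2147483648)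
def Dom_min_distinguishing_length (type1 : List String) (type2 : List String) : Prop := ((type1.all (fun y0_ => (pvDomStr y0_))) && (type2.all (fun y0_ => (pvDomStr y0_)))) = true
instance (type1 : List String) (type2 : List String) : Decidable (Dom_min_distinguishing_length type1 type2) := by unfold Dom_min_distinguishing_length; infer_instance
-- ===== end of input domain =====

-- B replaces A's linear scan over candidate lengths k by a binary search (the
-- "some window distinguishes" predicate is monotone in k); objective: faster.

-- ===== PORT A =====
-- s[i:i+k] on code points (PySem.Chars.slice is exact here)
def pvSub (s : String) (i k : Nat) : List Char :=
  PySem.Chars.slice s.toList (some (i : Int)) (some ((i : Int) + (k : Int)))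

-- the two 'for s in …: set.add(s[i:i+k])' loops of A
def pvASetOf (ts : List String) (i k : Nat) : PySem.Set (List Char) :=
  ts.foldl (fun st s => PySem.Set.add st (pvSub s i k)) PySem.Set.empty

-- A's inner 'for i in range(m-k+1)' loop with its early return: true iff it returns
def pvACheck (type1 type2 : List String) (m k : Nat) : Bool :=
  (List.range (m - k + 1)).any (fun i =>
    PySem.Set.inter (pvASetOf type1 i k) (pvASetOf type2 i k) == [])

-- A's outer 'for k in range(1, m+1)' loop: first k that checks, else m
def pvAScan (type1 type2 : List String) (m : Nat) : List Nat → Int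
  | [] => (m : Int)
  | k :: ks => if pvACheck type1 type2 m k then (k : Int) else pvAScan type1 type2 m ks

def min_distinguishing_length (type1 : List String) (type2 : List String) : Int :=
  let m := ((PySem.List.pyGet? type1 0).getD "").toList.length  -- len(type1[0]); total via Pre_
  pvAScan type1 type2 m (List.range' 1 m)

-- ===== PORT B =====
-- B's distinguishes(k): a type2 substring set built once per window, then an all-scan of type1
def pvBCheck (type1 type2 : List String) (m k : Nat) : Bool :=
  (List.range (m - k + 1)).any (fun i =>
    let t2 := PySem.Set.ofList (type2.map (fun s => pvSub s i k))
    type1.all (fun s => !(PySem.Set.contains t2 (pvSub s i k))))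

-- B's 'while lo < hi' binary-search loop
def pvBSearch (check : Nat → Bool) (lo hi : Nat) : Nat :=
  if _h : lo < hi then
    let mid := (lo + hi) / 2
    if check mid then pvBSearch check lo mid else pvBSearch check (mid + 1) hi
  else lo
termination_by hi - lo
decreasing_by all_goals omega

def min_distinguishing_length_alt (type1 : List String) (type2 : List String) : Int :=
  let m := ((PySem.List.pyGet? type1 0).getD "").toList.length  -- len(type1[0]); total via Pre_
  if m = 0 then 0
  else (pvBSearch (pvBCheck type1 type2 m) 1 m : Int)

-- ===== PRECONDITION & SPEC =====
-- Pre_ excludes only empty type1, on which Python A raises IndexError at type1[0].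
def Pre_min_distinguishing_length (type1 : List String) (type2 : List String) : Prop :=
  type1 ≠ []
instance (type1 : List String) (type2 : List String) : Decidable (Pre_min_distinguishing_length type1 type2) := by unfold Pre_min_distinguishing_length; infer_instance
def pvWitness_min_distinguishing_length : List String × List String := (["ab", "bb"], ["aa"])

def Spec_min_distinguishing_length (type1 : List String) (type2 : List String) (out : Int) : Prop := out = min_distinguishing_length_alt type1 type2
instance (type1 : List String) (type2 : List String) (out : Int) : Decidable (Spec_min_distinguishing_length type1 type2 out) := by unfold Spec_min_distinguishing_length; infer_instance

-- ===== CLAIM (what is proved, stated in full; the proofs are below) =====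
def Claim_equal_min_distinguishing_length : Prop := ∀ (type1 : List String) (type2 : List String), Dom_min_distinguishing_length type1 type2 → Pre_min_distinguishing_length type1 type2 → Spec_min_distinguishing_length type1 type2 (min_distinguishing_length type1 type2)

-- ===== LEMMAS AND PROOFS =====

-- the shared Prop behind both window checks: some window of width k separates type1 from type2
def pvP (t1 t2 : List String) (m k : Nat) : Prop :=
  ∃ i, i < m - k + 1 ∧ ∀ s ∈ t1, ∀ t ∈ t2, pvSub s i k ≠ pvSub t i k

theorem pvSub_eq (s : String) (i k : Nat) : pvSub s i k = (s.toList.drop i).take k := by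
  simp [pvSub, PySem.List.slice_natCast_add]

theorem mem_pvASetOf {x : List Char} {ts : List String} {i k : Nat} :
    x ∈ pvASetOf ts i k ↔ ∃ s ∈ ts, x = pvSub s i k := by
  simp [pvASetOf, PySem.Set.mem_foldl_add, PySem.Set.empty]

theorem pvACheck_iff (t1 t2 : List String) (m k : Nat) :
    pvACheck t1 t2 m k = true ↔ pvP t1 t2 m k := by
  simp only [pvACheck, pvP, List.any_eq_true, List.mem_range, beq_iff_eq,
    List.eq_nil_iff_forall_not_mem, PySem.Set.mem_inter, mem_pvASetOf]
  constructor
  · rintro ⟨i, hi, h⟩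
    exact ⟨i, hi, fun s hs t ht he => h (pvSub s i k) ⟨⟨s, hs, rfl⟩, ⟨t, ht, he⟩⟩⟩
  · rintro ⟨i, hi, h⟩
    refine ⟨i, hi, fun x hx => ?_⟩
    obtain ⟨⟨s, hs, hxs⟩, ⟨t, ht, hxt⟩⟩ := hx
    exact h s hs t ht (hxs ▸ hxt ▸ rfl)

theorem pvBCheck_iff (t1 t2 : List String) (m k : Nat) :
    pvBCheck t1 t2 m k = true ↔ pvP t1 t2 m k := by
  simp only [pvBCheck, pvP, List.any_eq_true, List.mem_range, List.all_eq_true,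
    Bool.not_eq_true', ← Bool.not_eq_true, PySem.Set.contains_iff, PySem.Set.mem_ofList,
    List.mem_map]
  constructor
  · rintro ⟨i, hi, h⟩
    exact ⟨i, hi, fun s hs t ht he => h s hs ⟨t, ht, he.symm⟩⟩
  · rintro ⟨i, hi, h⟩
    refine ⟨i, hi, fun s hs hmem => ?_⟩
    obtain ⟨t, ht, he⟩ := hmem
    exact h s hs t ht he.symm

theorem pvCheck_eq (t1 t2 : List String) (m k : Nat) :
    pvACheck t1 t2 m k = pvBCheck t1 t2 m k := by
  rw [Bool.eq_iff_iff, pvACheck_iff, pvBCheck_iff]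

-- monotonicity in k: a separating window of width k yields one of width k+1
theorem pvP_succ {t1 t2 : List String} {m k : Nat} (hk : k < m)
    (h : pvP t1 t2 m k) : pvP t1 t2 m (k + 1) := by
  obtain ⟨i, hi, hd⟩ := h
  by_cases hc : i < m - (k + 1) + 1
  · refine ⟨i, hc, fun s hs t ht he => hd s hs t ht ?_⟩
    have := congrArg (List.take k) he
    simpa [pvSub_eq, List.take_take] using this
  · have hieq : i = m - k := by omega
    have hi1 : 1 ≤ i := by omega
    refine ⟨i - 1, by omega, fun s hs t ht he => hd s hs t ht ?_⟩
    have := congrArg (List.drop 1) he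
    simp only [pvSub_eq, List.drop_take, List.drop_drop] at this ⊢
    have h1 : i - 1 + 1 = i := by omega
    rw [h1] at this
    simpa using this

theorem pvP_mono {t1 t2 : List String} {m j k : Nat} (hjk : j ≤ k) (hk : k ≤ m)
    (h : pvP t1 t2 m j) : pvP t1 t2 m k := by
  induction k, hjk using Nat.le_induction with
  | base => exact h
  | succ n hn ih => exact pvP_succ (by omega) (ih (by omega))

theorem pvBCheck_mono {t1 t2 : List String} {m j k : Nat} (hjk : j ≤ k) (hk : k ≤ m)
    (h : pvBCheck t1 t2 m j = true) : pvBCheck t1 t2 m k = true :=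
  (pvBCheck_iff t1 t2 m k).mpr (pvP_mono hjk hk ((pvBCheck_iff t1 t2 m j).mp h))

-- A's scan returns m when no candidate in the range checks
theorem pvAScan_none (t1 t2 : List String) (m : Nat) :
    ∀ len a, (∀ k, a ≤ k → k < a + len → pvACheck t1 t2 m k = false) →
    pvAScan t1 t2 m (List.range' a len) = (m : Int) := by
  intro len
  induction len with
  | zero => intro a _; simp [pvAScan]
  | succ n ih =>
    intro a h
    rw [List.range'_succ]
    simp only [pvAScan, h a (le_refl a) (by omega)]
    simp only [Bool.false_eq_true, if_false]
    exact ih (a + 1) (fun k hk1 hk2 => h k (by omega) (by omega))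

-- A's scan returns the first checking candidate
theorem pvAScan_found (t1 t2 : List String) (m : Nat) :
    ∀ len a b, pvACheck t1 t2 m b = true → a ≤ b → b < a + len →
    (∀ k, a ≤ k → k < b → pvACheck t1 t2 m k = false) →
    pvAScan t1 t2 m (List.range' a len) = (b : Int) := by
  intro len
  induction len with
  | zero => intro a b _ _ h2 _; omega
  | succ n ih =>
    intro a b hb hab hblt hprev
    rw [List.range'_succ]
    rcases Nat.eq_or_lt_of_le hab with heq | hlt
    · subst heq
      simp [pvAScan, hb]
    · simp only [pvAScan, hprev a (le_refl a) hlt, Bool.false_eq_true, if_false]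
      exact ih (a + 1) b hb (by omega) (by omega) (fun k hk1 hk2 => hprev k (by omega) hk2)

-- binary-search invariant: the result r keeps everything below r false and (check r ∨ r = m)
theorem pvBSearch_spec (check : Nat → Bool) (m : Nat)
    (hmono : ∀ j k, j ≤ k → k ≤ m → check j = true → check k = true) :
    ∀ n lo hi, hi - lo = n → 1 ≤ lo → lo ≤ hi → hi ≤ m →
    (∀ j, 1 ≤ j → j < lo → check j = false) →
    (check hi = true ∨ hi = m) →
    lo ≤ pvBSearch check lo hi ∧ pvBSearch check lo hi ≤ hi ∧
    (∀ j, 1 ≤ j → j < pvBSearch check lo hi → check j = false) ∧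
    (check (pvBSearch check lo hi) = true ∨ pvBSearch check lo hi = m) := by
  intro n
  induction n using Nat.strong_induction_on with
  | _ n ih =>
    intro lo hi hn hlo1 hlohi hhim hinv hright
    rw [pvBSearch]
    by_cases h : lo < hi
    · simp only [h, dite_true]
      by_cases hc : check ((lo + hi) / 2) = true
      · simp only [hc, if_true]
        have hres := ih (((lo + hi) / 2) - lo) (by omega) lo ((lo + hi) / 2) rfl hlo1
          (by omega) (by omega) hinv (Or.inl hc)
        refine ⟨hres.1, ?_, hres.2.2⟩
        have := hres.2.1
        omega
      · rw [if_neg hc]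
        have hinv' : ∀ j, 1 ≤ j → j < (lo + hi) / 2 + 1 → check j = false := by
          intro j hj1 hj2
          by_cases hjlo : j < lo
          · exact hinv j hj1 hjlo
          · by_cases hcj : check j = true
            · exact absurd (hmono j ((lo + hi) / 2) (by omega) (by omega) hcj) hc
            · exact Bool.eq_false_iff.mpr hcj
        have hres := ih (hi - ((lo + hi) / 2 + 1)) (by omega) ((lo + hi) / 2 + 1) hi rfl
          (by omega) (by omega) hhim hinv' hright
        refine ⟨?_, hres.2.1, hres.2.2⟩
        have := hres.1
        omega
    · simp only [h, dite_false]
      have : lo = hi := by omega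
      exact ⟨le_refl lo, le_of_eq this, hinv, this ▸ hright⟩

-- ===== VERDICT (by name: the statement is the Claim_ definition above) =====
theorem min_distinguishing_length_spec : Claim_equal_min_distinguishing_length := by
  intro t1 t2 _ _
  unfold Spec_min_distinguishing_length min_distinguishing_length min_distinguishing_length_alt
  set m := ((PySem.List.pyGet? t1 0).getD "").toList.length with hm
  by_cases hm0 : m = 0
  · simp [hm0, pvAScan]
  · simp only [hm0, if_false]
    have hres := pvBSearch_spec (pvBCheck t1 t2 m) m
      (fun j k hjk hk hcj => pvBCheck_mono hjk hk hcj) (m - 1) 1 m rfl (le_refl 1)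
      (by omega) (le_refl m) (fun j hj1 hj2 => by omega) (Or.inr rfl)
    set r := pvBSearch (pvBCheck t1 t2 m) 1 m with hr
    by_cases hcr : pvBCheck t1 t2 m r = true
    · exact pvAScan_found t1 t2 m m 1 r (by rw [pvCheck_eq]; exact hcr) hres.1 (by omega)
        (fun k hk1 hk2 => by rw [pvCheck_eq]; exact hres.2.2.1 k hk1 (by omega))
    · have hrm : r = m := (hres.2.2.2).resolve_left hcr
      rw [hrm]
      refine pvAScan_none t1 t2 m m 1 (fun k hk1 hk2 => ?_)
      rw [pvCheck_eq]
      rcases Nat.lt_or_ge k r with hkr | hkr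
      · exact hres.2.2.1 k hk1 hkr
      · have hkeq : k = r := by omega
        rw [hkeq]
        exact Bool.eq_false_iff.mpr hcr
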